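-- pv_equiv track=rewrite | github.com/jamniel/AWS_Repo | ChangeSG/Final/change_sg_via_IP_v1.2.py | del_sub_list
-- ===== SOURCE A (Python) =====
-- def del_sub_list(s_list, p_list):
--     not_found_item = []
--     del_item = []
--     for item in s_list:
--         try:
--             p_list.remove(item)
--             del_item.append(item)
--         except:
--             not_found_item.append(item)
--     return p_list, not_found_item, del_item
-- ===== SOURCE B (Python) =====
-- def del_sub_list(s_list, p_list):
--     # Counter-based single pass (O(n+m)); mutates p_list in place like the original.
--     avail = {}
--     for x in p_list:
--         avail[x] = avail.get(x, 0) + 1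
--     removed = {}
--     not_found_item = []
--     del_item = []
--     for item in s_list:
--         if avail.get(item, 0) > 0:
--             avail[item] = avail[item] - 1
--             removed[item] = removed.get(item, 0) + 1
--             del_item.append(item)
--         else:
--             not_found_item.append(item)
--     remaining = []
--     for x in p_list:
--         if removed.get(x, 0) > 0:
--             removed[x] = removed[x] - 1
--         else:
--             remaining.append(x)
--     p_list[:] = remaining
--     return p_list, not_found_item, del_item
-- ===== Notes on version B (the rewrite author's own statement) =====
-- stated objective: faster
-- what changed: Replaces the per-item list.remove scan with a counter of p_list (O(1) membership/decrement) plus one filter pass that drops the first removed-count occurrences of each value.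
import Mathlib
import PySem

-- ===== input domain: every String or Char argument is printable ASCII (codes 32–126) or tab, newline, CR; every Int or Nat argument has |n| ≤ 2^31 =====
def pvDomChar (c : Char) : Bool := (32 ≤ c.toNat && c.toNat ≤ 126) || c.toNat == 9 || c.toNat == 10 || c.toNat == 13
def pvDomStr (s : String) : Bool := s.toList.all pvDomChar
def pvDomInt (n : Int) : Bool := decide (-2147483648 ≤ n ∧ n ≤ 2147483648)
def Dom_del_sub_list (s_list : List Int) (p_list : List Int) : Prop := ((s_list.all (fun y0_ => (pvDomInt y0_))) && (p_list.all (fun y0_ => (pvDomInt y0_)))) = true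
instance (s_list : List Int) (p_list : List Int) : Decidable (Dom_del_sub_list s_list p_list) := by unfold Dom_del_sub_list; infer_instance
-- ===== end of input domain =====

-- B replaces A's repeated list.remove scans by counters plus one filter pass.
-- Both Pythons mutate p_list in place; the equivalence proved here is about the return value.

-- ===== PORT A =====
def del_sub_list (s_list : List Int) (p_list : List Int) : List Int × List Int × List Int :=
  let st := s_list.foldl (fun (st : List Int × List Int × List Int) item =>
    match PySem.List.remove? st.1 item with
    | some p' => (p', st.2.1, st.2.2 ++ [item])
    | none => (st.1, st.2.1 ++ [item], st.2.2)) (p_list, ([] : List Int), ([] : List Int))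
  (st.1, st.2.1, st.2.2)

-- ===== PORT B =====
def del_sub_list_alt (s_list : List Int) (p_list : List Int) : List Int × List Int × List Int :=
  let avail : PySem.Dict Int Int :=
    p_list.foldl (fun d x => d.insert x (d.getD x 0 + 1)) PySem.Dict.empty
  let st := s_list.foldl
    (fun (st : PySem.Dict Int Int × PySem.Dict Int Int × List Int × List Int) item =>
      if st.1.getD item 0 > 0 then
        (st.1.insert item (st.1.getD item 0 - 1),
         st.2.1.insert item (st.2.1.getD item 0 + 1), st.2.2.1, st.2.2.2 ++ [item])
      else
        (st.1, st.2.1, st.2.2.1 ++ [item], st.2.2.2))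
    (avail, PySem.Dict.empty, ([] : List Int), ([] : List Int))
  let rem := p_list.foldl
    (fun (st : PySem.Dict Int Int × List Int) x =>
      if st.1.getD x 0 > 0 then (st.1.insert x (st.1.getD x 0 - 1), st.2)
      else (st.1, st.2 ++ [x])) (st.2.1, ([] : List Int))
  (rem.2, st.2.2.1, st.2.2.2)

-- ===== PRECONDITION & SPEC =====
def Spec_del_sub_list (s_list : List Int) (p_list : List Int) (out : List Int × List Int × List Int) : Prop := out = del_sub_list_alt s_list p_list
instance (s_list : List Int) (p_list : List Int) (out : List Int × List Int × List Int) : Decidable (Spec_del_sub_list s_list p_list out) := by unfold Spec_del_sub_list; infer_instance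

-- ===== CLAIM (what is proved, stated in full; the proofs are below) =====
def Claim_equal_del_sub_list : Prop := ∀ (s_list : List Int) (p_list : List Int), Dom_del_sub_list s_list p_list → Spec_del_sub_list s_list p_list (del_sub_list s_list p_list)

-- ===== LEMMAS AND PROOFS =====

-- Proof-side names for the three loop bodies (definitionally the lambdas of the ports).
def stepA (st : List Int × List Int × List Int) (item : Int) : List Int × List Int × List Int :=
  match PySem.List.remove? st.1 item with
  | some p' => (p', st.2.1, st.2.2 ++ [item])
  | none => (st.1, st.2.1 ++ [item], st.2.2)

def stepB (st : PySem.Dict Int Int × PySem.Dict Int Int × List Int × List Int) (item : Int) :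
    PySem.Dict Int Int × PySem.Dict Int Int × List Int × List Int :=
  if st.1.getD item 0 > 0 then
    (st.1.insert item (st.1.getD item 0 - 1),
     st.2.1.insert item (st.2.1.getD item 0 + 1), st.2.2.1, st.2.2.2 ++ [item])
  else
    (st.1, st.2.1, st.2.2.1 ++ [item], st.2.2.2)

def stepC (st : PySem.Dict Int Int × List Int) (x : Int) : PySem.Dict Int Int × List Int :=
  if st.1.getD x 0 > 0 then (st.1.insert x (st.1.getD x 0 - 1), st.2)
  else (st.1, st.2 ++ [x])

def cnt (p : List Int) : PySem.Dict Int Int :=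
  p.foldl (fun d x => d.insert x (d.getD x 0 + 1)) PySem.Dict.empty

theorem del_sub_list_eq (s p : List Int) :
    del_sub_list s p =
      ((s.foldl stepA (p, [], [])).1, (s.foldl stepA (p, [], [])).2.1,
       (s.foldl stepA (p, [], [])).2.2) := rfl

theorem del_sub_list_alt_eq (s p : List Int) :
    del_sub_list_alt s p =
      ((p.foldl stepC ((s.foldl stepB (cnt p, PySem.Dict.empty, [], [])).2.1, [])).2,
       (s.foldl stepB (cnt p, PySem.Dict.empty, [], [])).2.2.1,
       (s.foldl stepB (cnt p, PySem.Dict.empty, [], [])).2.2.2) := rfl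

theorem stepA_some {p nf dl p' : List Int} {item : Int}
    (h : PySem.List.remove? p item = some p') :
    stepA (p, nf, dl) item = (p', nf, dl ++ [item]) := by
  simp [stepA, h]

theorem stepA_none {p nf dl : List Int} {item : Int}
    (h : PySem.List.remove? p item = none) :
    stepA (p, nf, dl) item = (p, nf ++ [item], dl) := by
  simp [stepA, h]

theorem stepB_pos {av rm : PySem.Dict Int Int} {nf dl : List Int} {item : Int}
    (h : av.getD item 0 > 0) :
    stepB (av, rm, nf, dl) item =
      (av.insert item (av.getD item 0 - 1), rm.insert item (rm.getD item 0 + 1), nf, dl ++ [item]) := by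
  simp [stepB, h]

theorem stepB_neg {av rm : PySem.Dict Int Int} {nf dl : List Int} {item : Int}
    (h : ¬ av.getD item 0 > 0) :
    stepB (av, rm, nf, dl) item = (av, rm, nf ++ [item], dl) := by
  simp [stepB, h]

-- `stripF f l` drops, for each value y, the first `f y` occurrences of y from l
-- (the functional content of B's final filter pass).
def stripF (f : Int → Int) : List Int → List Int
  | [] => []
  | x :: xs => if f x > 0 then stripF (fun y => if y = x then f y - 1 else f y) xs
               else x :: stripF f xs

theorem stripF_nonpos (f : Int → Int) (l : List Int) (h : ∀ y, f y ≤ 0) :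
    stripF f l = l := by
  induction l with
  | nil => simp [stripF]
  | cons x xs ih =>
    simp only [stripF, if_neg (not_lt.mpr (h x))]
    exact congrArg (x :: ·) ih

-- B's final pass computes stripF of the removal counts.
theorem strip_fold (l : List Int) (rm : PySem.Dict Int Int) (acc : List Int) :
    (l.foldl stepC (rm, acc)).2 = acc ++ stripF (fun y => rm.getD y 0) l := by
  induction l generalizing rm acc with
  | nil => simp [stripF]
  | cons x xs ih =>
    rw [List.foldl_cons]
    by_cases h : rm.getD x 0 > 0
    · rw [show stepC (rm, acc) x = (rm.insert x (rm.getD x 0 - 1), acc) from by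
        simp [stepC, h], ih]
      simp only [stripF, if_pos h]
      have hfun : (fun y => (rm.insert x (rm.getD x 0 - 1)).getD y 0)
          = (fun y => if y = x then rm.getD y 0 - 1 else rm.getD y 0) := by
        funext y
        rw [PySem.Dict.getD_insert]
        split_ifs with hy <;> simp [hy]
      rw [hfun]
    · rw [show stepC (rm, acc) x = (rm, acc ++ [x]) from by simp [stepC, h], ih]
      simp only [stripF, if_neg h, List.append_assoc, List.singleton_append]

-- Incrementing the removal count of a present value removes its first occurrence.
theorem stripF_bump (l : List Int) (f : Int → Int) (item : Int)
    (hf : ∀ y, 0 ≤ f y) (hmem : item ∈ stripF f l) :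
    PySem.List.remove? (stripF f l) item
      = some (stripF (fun y => if y = item then f y + 1 else f y) l) := by
  induction l generalizing f with
  | nil => simp [stripF] at hmem
  | cons x xs ih =>
    by_cases hfx : f x > 0
    · have hfx' : (if x = item then f x + 1 else f x) > 0 := by split_ifs <;> omega
      simp only [stripF, if_pos hfx, if_pos hfx'] at hmem ⊢
      have hcomm : (fun y => if y = x then (if y = item then f y + 1 else f y) - 1
                             else (if y = item then f y + 1 else f y))
          = (fun y => if y = item then (if y = x then f y - 1 else f y) + 1
                      else (if y = x then f y - 1 else f y)) := by
        funext y; split_ifs <;> ring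
      rw [hcomm]
      refine ih _ ?_ hmem
      intro y
      by_cases hy : y = x
      · subst hy; simp only [if_pos rfl]; omega
      · simp only [if_neg hy]; exact hf y
    · have hx0 : f x = 0 := by have := hf x; omega
      simp only [stripF, if_neg hfx] at hmem ⊢
      by_cases hx : x = item
      · subst hx
        have hcond : (if x = x then f x + 1 else f x) > 0 := by simp [hx0]
        rw [if_pos hcond, PySem.List.remove?_cons_self]
        have hfun : (fun y => if y = x then (if y = x then f y + 1 else f y) - 1
                              else (if y = x then f y + 1 else f y)) = f := by
          funext y; split_ifs <;> ring
        rw [hfun]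
      · have hcond : ¬ ((if x = item then f x + 1 else f x) > 0) := by
          simp only [if_neg hx]; exact hfx
        rw [if_neg hcond]
        have hmem' : item ∈ stripF f xs := by
          cases hmem with
          | head => exact absurd rfl hx
          | tail _ h => exact h
        rw [PySem.List.remove?_cons_of_ne _ hx, ih f hf hmem']
        rfl

-- Count of a value after stripping.
theorem stripF_count (l : List Int) (f : Int → Int) (x : Int)
    (h0 : 0 ≤ f x) (hle : f x ≤ (l.count x : Int)) :
    ((stripF f l).count x : Int) = (l.count x : Int) - f x := by
  induction l generalizing f with
  | nil =>
    simp only [List.count_nil, Nat.cast_zero] at hle ⊢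
    simp only [stripF, List.count_nil, Nat.cast_zero]
    omega
  | cons y ys ih =>
    by_cases hfy : f y > 0
    · simp only [stripF, if_pos hfy]
      by_cases hxy : x = y
      · subst hxy
        have hc : (x :: ys).count x = ys.count x + 1 := by simp
        rw [hc] at hle
        have h := ih (fun z => if z = x then f z - 1 else f z)
          (by simp only [if_pos rfl]; omega)
          (by simp only [if_pos rfl]; push_cast at hle ⊢; omega)
        simp only [if_pos rfl] at h
        rw [h, hc]
        push_cast; ring
      · have hyx : y ≠ x := fun h => hxy h.symm
        have hc : (y :: ys).count x = ys.count x := by simp [List.count_cons, hyx]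
        rw [hc] at hle
        have h := ih (fun z => if z = y then f z - 1 else f z)
          (by simp only [if_neg hxy]; exact h0)
          (by simp only [if_neg hxy]; exact hle)
        simp only [if_neg hxy] at h
        rw [h, hc]
    · simp only [stripF, if_neg hfy]
      by_cases hxy : x = y
      · subst hxy
        have hf0 : f x = 0 := by omega
        have hle' : f x ≤ (ys.count x : Int) := by
          rw [hf0]; exact_mod_cast Nat.zero_le _
        have h := ih f h0 hle'
        simp only [List.count_cons_self]
        push_cast at h ⊢
        omega
      · have hyx : y ≠ x := fun h => hxy h.symm
        have hc : (y :: ys).count x = ys.count x := by simp [List.count_cons, hyx]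
        have hc2 : (y :: stripF f ys).count x = (stripF f ys).count x := by
          simp [List.count_cons, hyx]
        rw [hc] at hle
        rw [hc2, hc]
        exact ih f h0 hle

-- Main loop correspondence: A's state list is stripF of B's removal counter.
theorem main_loop (s : List Int) (p_list : List Int)
    (rm av : PySem.Dict Int Int) (nf dl : List Int)
    (h0 : ∀ y, 0 ≤ rm.getD y 0)
    (hle : ∀ y, rm.getD y 0 ≤ (p_list.count y : Int))
    (hav : ∀ y, av.getD y 0 = (p_list.count y : Int) - rm.getD y 0) :
    (s.foldl stepA (stripF (fun y => rm.getD y 0) p_list, nf, dl)).1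
        = stripF (fun y => (s.foldl stepB (av, rm, nf, dl)).2.1.getD y 0) p_list
    ∧ (s.foldl stepA (stripF (fun y => rm.getD y 0) p_list, nf, dl)).2.1
        = (s.foldl stepB (av, rm, nf, dl)).2.2.1
    ∧ (s.foldl stepA (stripF (fun y => rm.getD y 0) p_list, nf, dl)).2.2
        = (s.foldl stepB (av, rm, nf, dl)).2.2.2 := by
  induction s generalizing rm av nf dl with
  | nil => exact ⟨rfl, rfl, rfl⟩
  | cons item rest ih =>
    have hcnt : ((stripF (fun y => rm.getD y 0) p_list).count item : Int)
        = (p_list.count item : Int) - rm.getD item 0 :=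
      stripF_count _ _ _ (h0 item) (hle item)
    by_cases hpos : av.getD item 0 > 0
    · have hmem : item ∈ stripF (fun y => rm.getD y 0) p_list := by
        rw [← List.count_pos_iff]
        have := hav item
        omega
      have hrem := stripF_bump p_list (fun y => rm.getD y 0) item h0 hmem
      rw [List.foldl_cons, List.foldl_cons, stepA_some hrem, stepB_pos hpos]
      have hfun : (fun y => if y = item then rm.getD y 0 + 1 else rm.getD y 0)
          = (fun y => (rm.insert item (rm.getD item 0 + 1)).getD y 0) := by
        funext y
        rw [PySem.Dict.getD_insert]
        split_ifs with hy <;> simp [hy]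
      rw [hfun]
      exact ih (rm.insert item (rm.getD item 0 + 1))
        (av.insert item (av.getD item 0 - 1)) nf (dl ++ [item])
        (fun y => by
          rw [PySem.Dict.getD_insert]
          split_ifs with hy
          · have := h0 item; omega
          · exact h0 y)
        (fun y => by
          rw [PySem.Dict.getD_insert]
          split_ifs with hy
          · subst hy; have := hav y; omega
          · exact hle y)
        (fun y => by
          rw [PySem.Dict.getD_insert, PySem.Dict.getD_insert]
          split_ifs with hy
          · subst hy; have := hav y; omega
          · exact hav y)
    · have hnmem : item ∉ stripF (fun y => rm.getD y 0) p_list := by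
        intro hm
        rw [← List.count_pos_iff] at hm
        have := hav item
        omega
      have hrem : PySem.List.remove? (stripF (fun y => rm.getD y 0) p_list) item = none := by
        rw [PySem.List.remove?_eq_none_iff]
        exact hnmem
      rw [List.foldl_cons, List.foldl_cons, stepA_none hrem, stepB_neg hpos]
      exact ih rm av (nf ++ [item]) dl h0 hle hav

theorem cnt_getD (p : List Int) (y : Int) : (cnt p).getD y 0 = (p.count y : Int) := by
  simp only [cnt]
  rw [PySem.Dict.getD_foldl_insert_add_one, PySem.Dict.getD_empty]
  omega

-- ===== VERDICT (by name: the statement is the Claim_ definition above) =====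
theorem del_sub_list_spec : Claim_equal_del_sub_list := by
  intro s_list p_list _
  unfold Spec_del_sub_list
  rw [del_sub_list_eq, del_sub_list_alt_eq]
  have h := main_loop s_list p_list PySem.Dict.empty (cnt p_list) [] []
    (fun y => by rw [PySem.Dict.getD_empty])
    (fun y => by rw [PySem.Dict.getD_empty]; exact_mod_cast Nat.zero_le _)
    (fun y => by rw [PySem.Dict.getD_empty, cnt_getD]; ring)
  have hinit : stripF (fun y => (PySem.Dict.empty : PySem.Dict Int Int).getD y 0) p_list
      = p_list :=
    stripF_nonpos _ _ (fun y => by rw [PySem.Dict.getD_empty])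
  rw [hinit] at h
  obtain ⟨h1, h2, h3⟩ := h
  have hc : (p_list.foldl stepC
      ((s_list.foldl stepB (cnt p_list, PySem.Dict.empty, [], [])).2.1, [])).2
      = stripF (fun y => (s_list.foldl stepB (cnt p_list, PySem.Dict.empty, [], [])).2.1.getD y 0) p_list := by
    rw [strip_fold]
    exact List.nil_append _
  rw [hc, h1, h2, h3]
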